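-- pv_equiv track=rewrite | github.com/BastienZim/AdventOfCode | day8/day8.py | get_sure_numbers
-- ===== SOURCE A (Python) =====
-- def get_sure_numbers(segments):
--     sureList = []
--     for i, seg in enumerate(segments):
--         possible = num_segs_to_digit(len(seg))
--         if(len(possible)==1):
--             real_num = possible[0][0]
--             sureList.append((seg, real_num))
--     return(sureList)
--
-- def num_segs_to_digit(num):
--     segs = ['abcefg', 'cf', 'acdeg', 'acdfg', 'bcdf', 'abdfg', 'abdefg', 'acf', 'acbdefg', 'abcdfg']
--     return([(i,x) for i, x in enumerate(segs) if len(x)==num])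
-- ===== SOURCE B (Python) =====
-- def get_sure_numbers(segments):
--     canonical = ['abcefg', 'cf', 'acdeg', 'acdfg', 'bcdf', 'abdfg', 'abdefg', 'acf', 'acbdefg', 'abcdfg']
--     lens = [len(x) for x in canonical]
--     uniq = {n: lens.index(n) for n in lens if lens.count(n) == 1}
--     return [(seg, uniq[len(seg)]) for seg in segments if len(seg) in uniq]
-- ===== Notes on version B (the rewrite author's own statement) =====
-- stated objective: faster
-- what changed: B precomputes, via count/index over the canonical table's length list, a dict of the lengths that occur exactly once mapped to their digit, then emits the answer as one filter+map comprehension over segments, instead of A's per-segment rebuild-and-scan of the 10-entry table with an appending loop.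
import Mathlib
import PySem

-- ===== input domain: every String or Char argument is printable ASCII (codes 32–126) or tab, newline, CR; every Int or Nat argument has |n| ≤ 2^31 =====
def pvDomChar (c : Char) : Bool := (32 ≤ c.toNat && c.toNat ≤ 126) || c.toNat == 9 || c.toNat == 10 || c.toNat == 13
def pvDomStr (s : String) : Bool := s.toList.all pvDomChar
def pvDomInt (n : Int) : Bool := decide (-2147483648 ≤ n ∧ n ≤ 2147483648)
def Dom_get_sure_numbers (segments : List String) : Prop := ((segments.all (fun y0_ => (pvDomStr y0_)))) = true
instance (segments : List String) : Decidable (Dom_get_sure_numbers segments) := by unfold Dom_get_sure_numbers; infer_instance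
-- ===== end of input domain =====

-- B precomputes once, via count/index over the canonical table's lengths, the dict of uniquely
-- occurring lengths mapped to their digit, and answers with a single filter+map pass over
-- `segments` — no per-segment table rebuild (objective: faster, constant-factor).

-- ===== PORT A =====
def pvSegs : List String :=
  ["abcefg", "cf", "acdeg", "acdfg", "bcdf", "abdfg", "abdefg", "acf", "acbdefg", "abcdfg"]

def num_segs_to_digit (num : Int) : List (Int × String) :=
  (PySem.List.enumerate pvSegs).filter (fun p => PySem.Str.len p.2 == num)

def get_sure_numbers (segments : List String) : List (String × Int) :=
  (PySem.List.enumerate segments).foldl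
    (fun sureList p =>
      let possible := num_segs_to_digit (PySem.Str.len p.2)
      if possible.length == 1 then
        sureList ++ [(p.2, (PySem.List.pyGetD possible 0 (0, "")).1)]
      else sureList) []

-- ===== PORT B =====
def pvCanonical : List String :=
  ["abcefg", "cf", "acdeg", "acdfg", "bcdf", "abdfg", "abdefg", "acf", "acbdefg", "abcdfg"]

-- lens = [len(x) for x in canonical]
def pvLens : List Int := pvCanonical.map PySem.Str.len

-- {n: lens.index(n) for n in lens if lens.count(n) == 1}; `lens.index(n)` cannot raise since
-- n is drawn from lens, so `(index? …).getD 0` is exact here.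
def pvUniq : PySem.Dict Int Int :=
  pvLens.foldl
    (fun d n =>
      if PySem.List.count pvLens n == 1 then
        d.insert n (((PySem.List.index? pvLens n).getD 0 : Nat) : Int)
      else d)
    PySem.Dict.empty

-- [(seg, uniq[len(seg)]) for seg in segments if len(seg) in uniq]; the lookup is guarded by
-- membership, so `getD … 0` is exact.
def get_sure_numbers_alt (segments : List String) : List (String × Int) :=
  (segments.filter (fun seg => pvUniq.contains (PySem.Str.len seg))).map
    (fun seg => (seg, pvUniq.getD (PySem.Str.len seg) 0))

-- ===== PRECONDITION & SPEC =====
def Spec_get_sure_numbers (segments : List String) (out : List (String × Int)) : Prop := out = get_sure_numbers_alt segments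
instance (segments : List String) (out : List (String × Int)) : Decidable (Spec_get_sure_numbers segments out) := by unfold Spec_get_sure_numbers; infer_instance

-- ===== CLAIM (what is proved, stated in full; the proofs are below) =====
def Claim_equal_get_sure_numbers : Prop := ∀ (segments : List String), Dom_get_sure_numbers segments → Spec_get_sure_numbers segments (get_sure_numbers segments)

-- ===== LEMMAS AND PROOFS =====

-- B's precomputed dict, evaluated.
theorem pvUniq_eq : pvUniq = PySem.Dict.mk [(2, 1), (4, 4), (3, 7), (7, 8)] := by decide

-- A's "exactly one digit has this length" test equals B's dict membership test.
theorem pv_key1 (n : Int) :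
    ((num_segs_to_digit n).length == 1) = pvUniq.contains n := by
  by_cases h2 : n = 2; · subst h2; decide
  by_cases h3 : n = 3; · subst h3; decide
  by_cases h4 : n = 4; · subst h4; decide
  by_cases h5 : n = 5; · subst h5; decide
  by_cases h6 : n = 6; · subst h6; decide
  by_cases h7 : n = 7; · subst h7; decide
  have hnum : num_segs_to_digit n = [] := by
    rw [num_segs_to_digit, List.filter_eq_nil_iff]
    have he : PySem.List.enumerate pvSegs = [(0, "abcefg"), (1, "cf"), (2, "acdeg"),
        (3, "acdfg"), (4, "bcdf"), (5, "abdfg"), (6, "abdefg"), (7, "acf"),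
        (8, "acbdefg"), (9, "abcdfg")] := by decide
    rw [he]
    intro p hp
    fin_cases hp <;> simp [PySem.Str.len] <;> omega
  rw [hnum, pvUniq_eq]
  simp
  omega

-- Where the test succeeds, A's extracted digit equals B's dict value.
theorem pv_key2 (n : Int) (h : ((num_segs_to_digit n).length == 1) = true) :
    (PySem.List.pyGetD (num_segs_to_digit n) 0 (0, "")).1 = pvUniq.getD n 0 := by
  have hc : pvUniq.contains n = true := (pv_key1 n) ▸ h
  rw [pvUniq_eq] at hc
  simp at hc
  rcases hc with h2 | h4 | h3 | h7
  · subst h2; decide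
  · subst h4; decide
  · subst h3; decide
  · subst h7; decide

-- A's per-element step function, rewritten as B's membership-and-lookup step.
theorem pv_step :
    (fun (sureList : List (String × Int)) (p : Int × String) =>
      let possible := num_segs_to_digit (PySem.Str.len p.2)
      if possible.length == 1 then
        sureList ++ [(p.2, (PySem.List.pyGetD possible 0 (0, "")).1)]
      else sureList)
    = (fun sureList p =>
        if pvUniq.contains (PySem.Str.len p.2) then
          sureList ++ [(p.2, pvUniq.getD (PySem.Str.len p.2) 0)]
        else sureList) := by
  funext acc p
  show (if ((num_segs_to_digit (PySem.Str.len p.2)).length == 1) = true then _ else _) = _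
  rw [pv_key1]
  by_cases hc : pvUniq.contains (PySem.Str.len p.2) = true
  · rw [if_pos hc, if_pos hc, pv_key2]
    rw [pv_key1]; exact hc
  · rw [if_neg hc, if_neg hc]

-- The rewritten fold over `enumerate segments` equals acc ++ B's filter+map comprehension.
theorem pv_fold (xs : List String) (k : Int) (acc : List (String × Int)) :
    (PySem.List.enumerate xs k).foldl
      (fun sureList p =>
        if pvUniq.contains (PySem.Str.len p.2) then
          sureList ++ [(p.2, pvUniq.getD (PySem.Str.len p.2) 0)]
        else sureList) acc
    = acc ++ (xs.filter (fun seg => pvUniq.contains (PySem.Str.len seg))).map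
        (fun seg => (seg, pvUniq.getD (PySem.Str.len seg) 0)) := by
  induction xs generalizing k acc with
  | nil => simp [PySem.List.enumerate_nil]
  | cons x xs ih =>
    rw [PySem.List.enumerate_cons]
    simp only [List.foldl_cons, List.filter_cons]
    by_cases hc : pvUniq.contains (PySem.Str.len x) = true
    · simp only [hc, if_true, List.map_cons]
      rw [ih (k + 1)]
      simp only [List.append_assoc, List.cons_append, List.nil_append]
    · simp only [hc, if_false, Bool.false_eq_true]
      exact ih (k + 1) acc

-- ===== VERDICT (by name: the statement is the Claim_ definition above) =====
theorem get_sure_numbers_spec : Claim_equal_get_sure_numbers := by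
  intro segments _
  show get_sure_numbers segments = get_sure_numbers_alt segments
  rw [get_sure_numbers, get_sure_numbers_alt, pv_step]
  simpa using pv_fold segments 0 []
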